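-- pv_equiv track=rewrite | github.com/Dormailler/Algorithm | 프로그래머스/lv0/120842. 2차원으로 만들기/2차원으로 만들기.py | solution
-- ===== SOURCE A (Python) =====
-- def solution(num_list, n):
--     answer = []
--     l = len(num_list) //n
--     j = 0
--     for i in range(1,l+1):
--         answer.append(num_list[j:n*i])
--         j += n
--     return answer
-- ===== SOURCE B (Python) =====
-- def solution(num_list, n):
--     rows = len(num_list) // n  # preserves ZeroDivisionError when n == 0
--     answer = []
--     row = []
--     for x in num_list:
--         row.append(x)
--         if len(row) == n:
--             answer.append(row)
--             row = []
--             if len(answer) == rows: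
--                 break
--     return answer
-- ===== Notes on version B (the rewrite author's own statement) =====
-- stated objective: alternative
-- what changed: B replaces A's precomputed-range-and-slice indexing (range over row indices, slicing num_list[j:n*i]) with a single element-wise pass that accumulates a current row and emits it when it reaches length n, breaking after len//n rows; the leading len//n keeps the ZeroDivisionError on n==0 and the remainder drop.
import Mathlib
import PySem

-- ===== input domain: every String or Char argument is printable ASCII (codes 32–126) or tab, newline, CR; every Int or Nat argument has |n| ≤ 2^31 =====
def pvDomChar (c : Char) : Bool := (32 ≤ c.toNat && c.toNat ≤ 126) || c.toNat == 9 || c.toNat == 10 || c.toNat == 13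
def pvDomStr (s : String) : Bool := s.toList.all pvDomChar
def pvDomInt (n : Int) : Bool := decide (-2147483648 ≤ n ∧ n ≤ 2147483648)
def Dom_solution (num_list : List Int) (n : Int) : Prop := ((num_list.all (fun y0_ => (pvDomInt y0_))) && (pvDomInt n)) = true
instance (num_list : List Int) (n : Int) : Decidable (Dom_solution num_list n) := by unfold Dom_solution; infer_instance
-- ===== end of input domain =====

-- B replaces A's index/slice arithmetic with a single element-wise pass that fills a
-- current row and emits it when full (objective: alternative decomposition, same cost).

-- ===== PORT A =====
-- A: l = len//n; j = 0; for i in range(1, l+1): answer.append(num_list[j:n*i]); j += n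
def solution (num_list : List Int) (n : Int) : List (List Int) :=
  let l := PySem.Int.floordiv (num_list.length : Int) n
  let st := (PySem.List.pyRange 1 (l + 1) 1).foldl
    (fun (st : List (List Int) × Int) i =>
      (st.1 ++ [PySem.List.slice num_list (some st.2) (some (n * i))], st.2 + n))
    ([], 0)
  st.1

-- ===== PORT B =====
-- B's loop: fill `row`; when full, move it to `answer`; break once `rows` rows collected.
def solutionAltLoop (rows : Int) (n : Int) (answer : List (List Int)) (row : List Int) :
    List Int → List (List Int)
  | [] => answer
  | x :: xs =>
    let row' := row ++ [x]
    if (row'.length : Int) = n then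
      let answer' := answer ++ [row']
      if (answer'.length : Int) = rows then answer'
      else solutionAltLoop rows n answer' [] xs
    else solutionAltLoop rows n answer row' xs

def solution_alt (num_list : List Int) (n : Int) : List (List Int) :=
  let rows := PySem.Int.floordiv (num_list.length : Int) n
  solutionAltLoop rows n [] [] num_list

-- ===== PRECONDITION & SPEC =====
-- Pre_ excludes exactly n = 0, where the Python A raises ZeroDivisionError.
def Pre_solution (num_list : List Int) (n : Int) : Prop := n ≠ 0
instance (num_list : List Int) (n : Int) : Decidable (Pre_solution num_list n) := by
  unfold Pre_solution; infer_instance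

def pvWitness_solution : List Int × Int := ([1, 2, 3, 4, 5], 2)

def Spec_solution (num_list : List Int) (n : Int) (out : List (List Int)) : Prop :=
  out = solution_alt num_list n
instance (num_list : List Int) (n : Int) (out : List (List Int)) : Decidable (Spec_solution num_list n out) := by
  unfold Spec_solution; infer_instance

-- ===== CLAIM (what is proved, stated in full; the proofs are below) =====
def Claim_equal_solution : Prop := ∀ (num_list : List Int) (n : Int),
  Dom_solution num_list n → Pre_solution num_list n →
  Spec_solution num_list n (solution num_list n)

-- ===== LEMMAS AND PROOFS =====

-- Reference chunking: successive blocks of m, dropping a short tail.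
def chunks (m : Nat) (xs : List Int) : List (List Int) :=
  if h : m = 0 ∨ xs.length < m then []
  else xs.take m :: chunks m (xs.drop m)
termination_by xs.length
decreasing_by
  simp only [List.length_drop]; omega

theorem chunks_of_lt {m : Nat} {xs : List Int} (h : xs.length < m) : chunks m xs = [] := by
  rw [chunks]; simp [h]

theorem chunks_of_le {m : Nat} {xs : List Int} (hm : 0 < m) (h : m ≤ xs.length) :
    chunks m xs = xs.take m :: chunks m (xs.drop m) := by
  rw [chunks]
  have : ¬ (m = 0 ∨ xs.length < m) := by omega
  simp [this]

-- ---------- A-side: solution = chunks ----------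

theorem solutionA_foldl (m : Nat) (num_list : List Int) :
    ∀ (l : Nat) (acc : List (List Int)) (a : Int),
    (PySem.List.pyRange a (a + l) 1).foldl
      (fun (st : List (List Int) × Int) i =>
        (st.1 ++ [PySem.List.slice num_list (some st.2) (some ((m : Int) * i))], st.2 + m))
      (acc, (m : Int) * (a - 1)) =
    (acc ++ (List.range l).map
      (fun (k : Nat) => PySem.List.slice num_list (some ((m : Int) * (a - 1 + (k : Int))))
                  (some ((m : Int) * (a + (k : Int))))), (m : Int) * (a - 1 + l)) := by
  intro l
  induction l with
  | zero => intro acc a; simp [PySem.List.pyRange_one_eq_nil]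
  | succ l ih =>
    intro acc a
    rw [show a + (((l + 1 : Nat)) : Int) = (a + 1) + (l : Int) by push_cast; ring,
        PySem.List.pyRange_one_cons (by push_cast; omega)]
    simp only [List.foldl_cons]
    rw [show (m : Int) * (a - 1) + m = (m : Int) * ((a + 1) - 1) by ring]
    rw [ih (acc ++ [PySem.List.slice num_list (some ((m : Int) * (a - 1)))
                  (some ((m : Int) * a))]) (a + 1)]
    rw [List.range_succ_eq_map]
    simp only [Prod.mk.injEq]
    refine ⟨?_, by push_cast; ring⟩
    simp only [List.map_cons, List.map_map, List.append_assoc, List.cons_append,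
      List.nil_append, Nat.cast_zero]
    congr 1
    congr 1
    · congr 2 <;> ring
    · apply List.map_congr_left
      intro k _
      simp only [Function.comp_apply]
      congr 2 <;> push_cast <;> ring

theorem range_map_slice_eq_chunks (m : Nat) (hm : 0 < m) :
    ∀ (l : Nat) (xs : List Int), l = xs.length / m →
    (List.range l).map
      (fun (k : Nat) => PySem.List.slice xs (some ((m : Int) * (k : Int)))
                  (some ((m : Int) * ((k : Int) + 1)))) = chunks m xs := by
  intro l
  induction l with
  | zero =>
    intro xs h
    have : xs.length < m := by
      rcases Nat.lt_or_ge xs.length m with h' | h'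
      · exact h'
      · exact absurd (Nat.div_pos h' hm) (by omega)
    simp [chunks_of_lt this]
  | succ l ih =>
    intro xs h
    have hlen : m ≤ xs.length := by
      by_contra h'
      rw [Nat.div_eq_of_lt (by omega)] at h
      omega
    rw [chunks_of_le hm hlen, List.range_succ_eq_map, List.map_cons, List.map_map]
    congr 1
    · simp only [Nat.cast_zero, mul_zero, zero_add, mul_one]
      rw [PySem.List.slice_zero_start, PySem.List.slice_to_natCast]
    · have hstep : xs.length / m = (xs.length - m) / m + 1 := by
        conv_lhs => rw [← Nat.sub_add_cancel hlen]
        rw [Nat.add_div_right _ hm]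
      rw [← ih (xs.drop m) (by rw [List.length_drop]; omega)]
      apply List.map_congr_left
      intro k _
      simp only [Function.comp_apply]
      have e1 : (m : Int) * (((k : Int)) + 1) = (((m * (k + 1) : Nat)) : Int) := by push_cast; ring
      have e2 : (m : Int) * (((k+1 : Nat) : Int)) = (((m * (k + 1) : Nat)) : Int) := by push_cast; ring
      have e3 : (m : Int) * (((k+1 : Nat) : Int) + 1) = (((m * (k + 2) : Nat)) : Int) := by push_cast; ring
      have e4 : (m : Int) * ((k : Int)) = (((m * k : Nat)) : Int) := by push_cast; ring
      have e5 : (m : Int) * (((k : Int)) + 1) = (((m * k + m : Nat)) : Int) := by push_cast; ring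
      have hA : m * (k + 1) = m * k + m := Nat.mul_succ m k
      have hB : m * (k + 2) = m * (k + 1) + m := Nat.mul_succ m (k + 1)
      rw [e3, e2, e4, e5, PySem.List.slice_natCast, PySem.List.slice_natCast,
          List.drop_drop, hB, hA]
      congr 1
      · omega
      · rw [Nat.add_comm]

theorem solutionA_eq_chunks (num_list : List Int) (m : Nat) (hm : 0 < m) :
    solution num_list (m : Int) = chunks m num_list := by
  unfold solution
  simp only [PySem.List.len_eq]
  have hfl : PySem.Int.floordiv ((num_list.length : Nat) : Int) ((m : Nat) : Int)
      = ((num_list.length / m : Nat) : Int) := PySem.Int.floordiv_natCast _ _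
  rw [hfl]
  have h := solutionA_foldl m num_list (num_list.length / m) [] 1
  rw [show (1 : Int) + ((num_list.length / m : Nat) : Int)
        = (((num_list.length / m : Nat)) : Int) + 1 by ring] at h
  rw [show ((m : Int) * ((1 : Int) - 1)) = (0 : Int) by ring] at h
  rw [h]
  simp only [List.nil_append]
  rw [← range_map_slice_eq_chunks m hm (num_list.length / m) num_list rfl]
  apply List.map_congr_left
  intro k _
  congr 2 <;> ring

-- ---------- B-side: solution_alt = chunks ----------

theorem chunks_cons_full (m : Nat) (hm : 0 < m) (row : List Int) (x : Int) (xs : List Int)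
    (hfull : row.length + 1 = m) :
    chunks m (row ++ x :: xs) = (row ++ [x]) :: chunks m xs := by
  have hlen2 : m ≤ (row ++ x :: xs).length := by simp; omega
  rw [chunks_of_le hm hlen2]
  congr 1
  · rw [show row ++ x :: xs = (row ++ [x]) ++ xs by simp]
    rw [List.take_append_of_le_length (by simp; omega)]
    apply List.take_of_length_le
    simp; omega
  · congr 1
    rw [show row ++ x :: xs = (row ++ [x]) ++ xs by simp]
    rw [List.drop_append_of_le_length (by simp; omega)]
    simp [hfull]

theorem solutionAltLoop_eq_chunks (m : Nat) (hm : 0 < m) :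
    ∀ (xs : List Int) (answer : List (List Int)) (row : List Int),
    row.length < m →
    solutionAltLoop ((answer.length : Int) + (((row.length + xs.length) / m : Nat) : Int))
        ((m : Nat) : Int) answer row xs
      = answer ++ chunks m (row ++ xs) := by
  intro xs
  induction xs with
  | nil =>
    intro answer row hrow
    simp [solutionAltLoop, chunks_of_lt (by simpa using hrow)]
  | cons x xs ih =>
    intro answer row hrow
    simp only [solutionAltLoop]
    by_cases hfull : row.length + 1 = m
    · have hdiv : (row.length + (x :: xs).length) / m = xs.length / m + 1 := by
        simp only [List.length_cons]
        rw [show row.length + (xs.length + 1) = xs.length + m by omega,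
            Nat.add_div_right _ hm]
      rw [if_pos (show (((row ++ [x]).length : Nat) : Int) = ((m : Nat) : Int) by simp [hfull])]
      by_cases hbrk : xs.length < m
      · rw [if_pos (show ((answer ++ [row ++ [x]]).length : Int)
              = (answer.length : Int) + (((row.length + (x :: xs).length) / m : Nat) : Int) by
            rw [show (row.length + (x :: xs).length) / m = 1 by
              rw [hdiv, Nat.div_eq_of_lt hbrk]]
            simp)]
        rw [chunks_cons_full m hm row x xs hfull, chunks_of_lt hbrk]
      · have hx : 0 < xs.length / m := Nat.div_pos (by omega) hm
        rw [if_neg (show ¬ ((answer ++ [row ++ [x]]).length : Int)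
              = (answer.length : Int) + (((row.length + (x :: xs).length) / m : Nat) : Int) by
            rw [hdiv]
            simp only [List.length_append, List.length_singleton]
            push_cast
            omega)]
        rw [show (answer.length : Int) + (((row.length + (x :: xs).length) / m : Nat) : Int)
              = (((answer ++ [row ++ [x]]).length : Nat) : Int)
                  + (((([] : List Int).length + xs.length) / m : Nat) : Int) by
            rw [hdiv]
            simp only [List.length_append, List.length_singleton, List.length_nil,
              Nat.zero_add]
            push_cast
            ring]
        rw [ih (answer ++ [row ++ [x]]) [] hm,
            chunks_cons_full m hm row x xs hfull]
        simp
    · rw [if_neg (show ¬ (((row ++ [x]).length : Nat) : Int) = ((m : Nat) : Int) by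
          simp only [List.length_append, List.length_singleton]
          exact_mod_cast hfull)]
      rw [show row.length + (x :: xs).length = (row ++ [x]).length + xs.length by
          simp; omega]
      rw [ih answer (row ++ [x]) (by simp; omega)]
      simp

theorem solutionAlt_eq_chunks (num_list : List Int) (m : Nat) (hm : 0 < m) :
    solution_alt num_list (m : Int) = chunks m num_list := by
  unfold solution_alt
  simp only [PySem.List.len_eq]
  rw [PySem.Int.floordiv_natCast]
  have := solutionAltLoop_eq_chunks m hm num_list [] [] hm
  simpa using this

-- ---------- negative n ----------

theorem solutionA_neg (num_list : List Int) (n : Int) (hn : n < 0) :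
    solution num_list n = [] := by
  simp only [solution]
  have hle : PySem.Int.floordiv (num_list.length : Int) n + 1 ≤ 1 := by
    have h1 : PySem.Int.floordiv (num_list.length : Int) n * n + PySem.Int.mod (num_list.length : Int) n
        = (num_list.length : Int) := PySem.Int.floordiv_mul_add_mod _ _
    have h2 := PySem.Int.mod_neg_bounds (a := (num_list.length : Int)) hn
    have h3 : (0 : Int) ≤ (num_list.length : Int) := by positivity
    nlinarith [h1, h2.1, h2.2, h3]
  rw [PySem.List.pyRange_one_eq_nil hle]
  simp

theorem solutionAltLoop_neg (rows n : Int) (hn : n < 0) :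
    ∀ (xs : List Int) (answer : List (List Int)) (row : List Int),
    solutionAltLoop rows n answer row xs = answer := by
  intro xs
  induction xs with
  | nil => intro answer row; simp [solutionAltLoop]
  | cons x xs ih =>
    intro answer row
    simp only [solutionAltLoop]
    have : ¬ (((row ++ [x]).length : Nat) : Int) = n := by
      have : (0 : Int) ≤ (((row ++ [x]).length : Nat) : Int) := by positivity
      omega
    rw [if_neg this]
    exact ih answer (row ++ [x])

-- ===== VERDICT (by name: the statement is the Claim_ definition above) =====
theorem solution_spec : Claim_equal_solution := by
  intro num_list n _ hpre
  unfold Spec_solution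
  rcases lt_trichotomy n 0 with hlt | heq | hgt
  · rw [solutionA_neg num_list n hlt]
    unfold solution_alt
    rw [solutionAltLoop_neg _ n hlt]
  · exact absurd heq hpre
  · obtain ⟨m, rfl⟩ : ∃ m : Nat, n = (m : Int) :=
      ⟨n.toNat, (Int.toNat_of_nonneg (le_of_lt hgt)).symm⟩
    have hm : 0 < m := by exact_mod_cast hgt
    rw [solutionA_eq_chunks num_list m hm, solutionAlt_eq_chunks num_list m hm]
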